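-- pv_equiv track=rewrite | github.com/teguharia172/Spinner | Spinner.py | spinner
-- ===== SOURCE A (Python) =====
-- def spinner(lst):                                   # define spinner function dengan parameter lst
--     empty_lst1 = []                                 # empty list untuk menampung hasil iterasi nantinya
--     empty_lst2 = []                                 # empty list untuk menampung hasil iterasi nantinya
--     empty_lst3 = []                                 # empty list untuk menampung hasil iterasi nantinya
--     extracted = [j for i in lst for j in i]         # list comprehension disini digunakan untuk mengunpack nested list menjadi 1 list dan ditampung dalam variable extracted
--     empty_lst1.extend(extracted[2:: 3])             # function extend disini untuk menambahkan beberapa value dalam satu list empty_lst1 akan ditambahkan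
--                                                     # value dari extracted dimulai dari index 2 sampai selesai dengan step 3
--     empty_lst2.extend(extracted[1:: 3])             # empty_lst2 akan ditambahkan value dari extracted di mulai dari index 1 sampai selesai dengan step 3
--     empty_lst3.extend(extracted[0:: 3])             # empty_lst3 akan ditambahkan value dari extracted di mulai dari index 0 sampai selesai dengan step 3
--     return ([empty_lst1, empty_lst2, empty_lst3])   # return function dalam bracket [] digunakan untuk mengubah list menjadi 1 instead of separating it into 3 different lists
-- ===== SOURCE B (Python) =====
-- def spinner(lst):
--     flat = [x for row in lst for x in row]
--     buckets = ([], [], [])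
--     for i, x in enumerate(flat):
--         buckets[i % 3].append(x)
--     return [buckets[2], buckets[1], buckets[0]]
-- ===== Notes on version B (the rewrite author's own statement) =====
-- stated objective: simpler
-- what changed: replaces the three strided slices extracted[2::3]/[1::3]/[0::3] by one distributing pass that appends each flattened element to buckets[i % 3]
import Mathlib
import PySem

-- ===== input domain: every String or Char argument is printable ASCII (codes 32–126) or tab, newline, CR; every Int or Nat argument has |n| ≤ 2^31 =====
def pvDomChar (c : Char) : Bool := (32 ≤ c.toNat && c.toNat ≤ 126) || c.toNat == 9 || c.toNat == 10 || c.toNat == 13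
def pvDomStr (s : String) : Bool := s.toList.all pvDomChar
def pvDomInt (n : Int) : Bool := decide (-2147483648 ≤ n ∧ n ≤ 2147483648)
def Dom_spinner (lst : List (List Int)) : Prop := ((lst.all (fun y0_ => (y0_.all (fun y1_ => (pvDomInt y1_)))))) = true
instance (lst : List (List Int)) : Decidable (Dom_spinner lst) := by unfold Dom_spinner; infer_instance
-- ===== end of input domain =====

-- B replaces the three strided slices by one distributing pass over the flattened list (objective: simpler).

-- ===== PORT A =====
def spinner (lst : List (List Int)) : List (List Int) :=
  let empty_lst1 : List Int := []
  let empty_lst2 : List Int := []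
  let empty_lst3 : List Int := []
  let extracted : List Int := lst.flatMap (fun i => i)
  let empty_lst1 := empty_lst1 ++ (PySem.List.slice? extracted (some 2) none 3).getD []
  let empty_lst2 := empty_lst2 ++ (PySem.List.slice? extracted (some 1) none 3).getD []
  let empty_lst3 := empty_lst3 ++ (PySem.List.slice? extracted (some 0) none 3).getD []
  [empty_lst1, empty_lst2, empty_lst3]

-- ===== PORT B =====
def spinner_alt (lst : List (List Int)) : List (List Int) :=
  let flat : List Int := lst.flatMap (fun row => row)
  let b := (PySem.List.enumerate flat).foldl
    (fun (acc : List Int × List Int × List Int) p =>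
      if PySem.Int.mod p.1 3 = 0 then (acc.1 ++ [p.2], acc.2.1, acc.2.2)
      else if PySem.Int.mod p.1 3 = 1 then (acc.1, acc.2.1 ++ [p.2], acc.2.2)
      else (acc.1, acc.2.1, acc.2.2 ++ [p.2]))
    ([], [], [])
  [b.2.2, b.2.1, b.1]

-- ===== PRECONDITION & SPEC =====
def Spec_spinner (lst : List (List Int)) (out : List (List Int)) : Prop := out = spinner_alt lst
instance (lst : List (List Int)) (out : List (List Int)) : Decidable (Spec_spinner lst out) := by unfold Spec_spinner; infer_instance

-- ===== CLAIM (what is proved, stated in full; the proofs are below) =====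
def Claim_equal_spinner : Prop := ∀ (lst : List (List Int)), Dom_spinner lst → Spec_spinner lst (spinner lst)

-- ===== LEMMAS AND PROOFS =====
def sftn (k : Nat) (xs : List Int) : List Int :=
  (List.range ((xs.length - k + 2) / 3)).map (fun j => xs.getD (k + 3 * j) 0)

theorem slice3_eq_sftn (xs : List Int) (k : Nat) (hk : k ≤ 2) :
    (PySem.List.slice? xs (some (k : Int)) none 3).getD [] = sftn k xs := by
  unfold PySem.List.slice? PySem.List.sliceIndices sftn
  norm_num
  simp only [if_neg (by omega : ¬ ((k : Int) < 0))]
  by_cases hkn : k ≤ xs.length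
  · rw [show min (k : Int) (xs.length : Int) = (k : Int) from by omega]
    rw [show (if (k : Int) < (xs.length : Int) then
        (((xs.length : Int) - (k : Int) + 3 - 1) / 3).toNat else 0)
        = (xs.length - k + 2) / 3 from by split_ifs with h <;> omega]
    rw [List.filterMap_congr (g := fun j => some (xs[k + 3 * j]?.getD 0))
      (by intro j hj
          simp only [List.mem_range] at hj
          have hidx : k + 3 * j < xs.length := by omega
          rw [show ((k : Int) + 3 * (j : Int)).toNat = k + 3 * j from by omega]
          rw [List.getElem?_eq_getElem hidx]
          simp [List.getElem?_eq_getElem hidx])]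
    rw [show (fun j => some (xs[k + 3 * j]?.getD 0)) = some ∘ (fun j => xs[k + 3 * j]?.getD 0) from rfl]
    rw [List.filterMap_eq_map]
  · rw [show min (k : Int) (xs.length : Int) = (xs.length : Int) from by omega]
    rw [if_neg (by omega : ¬ ((xs.length : Int) < (xs.length : Int)))]
    rw [show (xs.length - k + 2) / 3 = 0 from by omega]
    simp

theorem getD_cons3 (a b c : Int) (t : List Int) (m : Nat) :
    (a :: b :: c :: t).getD (m + 3) 0 = t.getD m 0 := by
  simp [List.getD]

def ref3 : List Int → List Int × List Int × List Int
  | [] => ([], [], [])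
  | [a] => ([a], [], [])
  | [a, b] => ([a], [b], [])
  | a :: b :: c :: t =>
    let r := ref3 t
    (a :: r.1, b :: r.2.1, c :: r.2.2)

theorem sftn_cons3 (k : Nat) (hk : k ≤ 2) (a b c : Int) (t : List Int) :
    sftn k (a :: b :: c :: t) = (a :: b :: c :: t).getD k 0 :: sftn k t := by
  unfold sftn
  rw [show ((a :: b :: c :: t).length - k + 2) / 3 = (t.length - k + 2) / 3 + 1 from by
        simp only [List.length_cons]; omega,
      List.range_succ_eq_map]
  simp only [List.map_cons, List.map_map]
  refine congrArg₂ _ (by norm_num) ?_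
  apply List.map_congr_left
  intro j _
  simp only [Function.comp_apply, Nat.succ_eq_add_one]
  rw [show k + 3 * (j + 1) = (k + 3 * j) + 3 from by omega, getD_cons3]

theorem sftn_ref3 (xs : List Int) :
    sftn 0 xs = (ref3 xs).1 ∧ sftn 1 xs = (ref3 xs).2.1 ∧ sftn 2 xs = (ref3 xs).2.2 := by
  induction xs using ref3.induct with
  | case1 => simp [sftn, ref3]
  | case2 a => refine ⟨?_, ?_, ?_⟩ <;> simp [sftn, ref3, List.range_succ, List.getD]
  | case3 a b => refine ⟨?_, ?_, ?_⟩ <;> simp [sftn, ref3, List.range_succ, List.getD]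
  | case4 a b c t ih =>
    obtain ⟨ih0, ih1, ih2⟩ := ih
    refine ⟨?_, ?_, ?_⟩
    · rw [sftn_cons3 0 (by omega), ih0]; simp [ref3, List.getD]
    · rw [sftn_cons3 1 (by omega), ih1]; simp [ref3, List.getD]
    · rw [sftn_cons3 2 (by omega), ih2]; simp [ref3, List.getD]

theorem enumerate_cons (a : Int) (t : List Int) (i : Int) :
    PySem.List.enumerate (a :: t) i = (i, a) :: PySem.List.enumerate t (i + 1) := rfl

theorem pymod3 (i : Int) : PySem.Int.mod i 3 = i % 3 :=
  PySem.Int.mod_eq_emod_of_pos (by norm_num)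

def bstep (acc : List Int × List Int × List Int) (p : Int × Int) : List Int × List Int × List Int :=
  if PySem.Int.mod p.1 3 = 0 then (acc.1 ++ [p.2], acc.2.1, acc.2.2)
  else if PySem.Int.mod p.1 3 = 1 then (acc.1, acc.2.1 ++ [p.2], acc.2.2)
  else (acc.1, acc.2.1, acc.2.2 ++ [p.2])

theorem fold_ref3 (xs : List Int) :
    ∀ (i : Int) (b0 b1 b2 : List Int), i % 3 = 0 →
    (PySem.List.enumerate xs i).foldl bstep (b0, b1, b2)
      = (b0 ++ (ref3 xs).1, b1 ++ (ref3 xs).2.1, b2 ++ (ref3 xs).2.2) := by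
  induction xs using ref3.induct with
  | case1 => intro i b0 b1 b2 _; simp [PySem.List.enumerate, ref3]
  | case2 a =>
    intro i b0 b1 b2 hi
    rw [enumerate_cons]
    simp [PySem.List.enumerate, ref3, bstep, hi]
  | case3 a b =>
    intro i b0 b1 b2 hi
    have h1 : (i + 1) % 3 = 1 := by omega
    rw [enumerate_cons, enumerate_cons]
    simp [PySem.List.enumerate, ref3, bstep, hi, h1]
  | case4 a b c t ih =>
    intro i b0 b1 b2 hi
    have h1 : (i + 1) % 3 = 1 := by omega
    have h2 : (i + 1 + 1) % 3 = 2 := by omega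
    have h3 : (i + 1 + 1 + 1) % 3 = 0 := by omega
    rw [enumerate_cons, enumerate_cons, enumerate_cons]
    simp only [List.foldl_cons, bstep, pymod3, hi, h1, h2]
    norm_num
    rw [ih (i + 1 + 1 + 1) _ _ _ h3]
    simp [ref3]

-- ===== VERDICT (by name: the statement is the Claim_ definition above) =====
theorem spinner_spec : Claim_equal_spinner := by
  intro lst _
  unfold Spec_spinner spinner spinner_alt
  simp only []
  set xs := lst.flatMap (fun i => i) with hxs
  have hS := sftn_ref3 xs
  have hB := fold_ref3 xs 0 [] [] [] (by decide)
  have hstep : (fun (acc : List Int × List Int × List Int) (p : Int × Int) =>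
      if PySem.Int.mod p.1 3 = 0 then (acc.1 ++ [p.2], acc.2.1, acc.2.2)
      else if PySem.Int.mod p.1 3 = 1 then (acc.1, acc.2.1 ++ [p.2], acc.2.2)
      else (acc.1, acc.2.1, acc.2.2 ++ [p.2])) = bstep := rfl
  rw [hstep, hB]
  simp only [List.nil_append]
  have h0 := slice3_eq_sftn xs 0 (by omega)
  have h1 := slice3_eq_sftn xs 1 (by omega)
  have h2 := slice3_eq_sftn xs 2 (by omega)
  norm_num at h0 h1 h2
  rw [h0, h1, h2, hS.1, hS.2.1, hS.2.2]
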